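-- pv_equiv track=rewrite | github.com/otlexy/savinov | lab 4 savinov/lab4.py | find_max_digits_in_symmetric_words
-- ===== SOURCE A (Python) =====
-- from typing import List
--
-- def find_max_digits_in_symmetric_words(symmetric:List)->List[str]:
--     """Ищет симметричных слова с максимальным количеством цифр
--     Возвращает список симметричных слов с максимальным количеством цифр"""
--     if not symmetric:
--         return []
--     max_nums = 0
--     result_words = []
--     for word in symmetric:
--         num_count = 0
--         for char in word:
--             if char >= '0' and char <= '9':
--                 num_count += 1
--         if num_count > max_nums:
--             max_nums = num_count
--             result_words = [word]
--         elif num_count == max_nums and num_count > 0: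
--             result_words.append(word)
--     return result_words
-- ===== SOURCE B (Python) =====
-- def find_max_digits_in_symmetric_words(symmetric):
--     counts = [sum(1 for c in word if '0' <= c <= '9') for word in symmetric]
--     m = max(counts, default=0)
--     if m == 0:
--         return []
--     return [w for w, c in zip(symmetric, counts) if c == m]
-- ===== Notes on version B (the rewrite author's own statement) =====
-- stated objective: simpler
-- what changed: Replaces the online running-max loop with conditional list rebuilding/appending by a two-pass compute-counts-then-filter structure (per-word digit counts, max with default 0, then a zip filter).
import Mathlib
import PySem

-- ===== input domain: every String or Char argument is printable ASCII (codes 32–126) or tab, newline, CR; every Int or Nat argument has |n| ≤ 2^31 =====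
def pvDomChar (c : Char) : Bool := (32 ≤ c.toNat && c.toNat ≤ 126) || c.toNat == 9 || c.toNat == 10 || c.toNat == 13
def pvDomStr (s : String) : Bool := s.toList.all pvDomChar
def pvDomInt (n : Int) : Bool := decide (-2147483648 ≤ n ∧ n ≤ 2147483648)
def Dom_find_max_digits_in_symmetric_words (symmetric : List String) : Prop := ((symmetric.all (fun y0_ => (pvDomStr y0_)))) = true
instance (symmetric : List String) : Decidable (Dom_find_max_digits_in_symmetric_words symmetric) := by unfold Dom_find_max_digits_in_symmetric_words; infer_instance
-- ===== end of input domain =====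

-- B replaces A's online running-max loop by a two-pass count-table-then-filter decomposition (same cost, plainer structure).


-- ===== PORT A =====
-- inner loop: num_count over the characters of word
def pvCountA (word : String) : Int :=
  word.toList.foldl (fun n c => if '0' ≤ c ∧ c ≤ '9' then n + 1 else n) 0

-- one iteration of A's for-loop over (max_nums, result_words)
def pvStepA (st : Int × List String) (word : String) : Int × List String :=
  let num_count := pvCountA word
  if num_count > st.1 then (num_count, [word])
  else if num_count = st.1 ∧ num_count > 0 then (st.1, st.2 ++ [word])
  else st

def find_max_digits_in_symmetric_words (symmetric : List String) : List String :=
  if symmetric = [] then []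
  else (symmetric.foldl pvStepA (0, [])).2

-- ===== PORT B =====
-- counts = [sum(1 for c in word if '0' <= c <= '9') for word in symmetric]
def pvCountB (word : String) : Int :=
  (word.toList.map (fun c => if '0' ≤ c ∧ c ≤ '9' then (1 : Int) else 0)).sum

def find_max_digits_in_symmetric_words_alt (symmetric : List String) : List String :=
  let counts := symmetric.map pvCountB
  let m := counts.foldl max 0      -- max(counts, default=0): all counts are ≥ 0
  if m = 0 then []
  else ((symmetric.zip counts).filter (fun p => decide (p.2 = m))).map Prod.fst

-- ===== PRECONDITION & SPEC =====
def Spec_find_max_digits_in_symmetric_words (symmetric : List String) (out : List String) : Prop := out = find_max_digits_in_symmetric_words_alt symmetric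
instance (symmetric : List String) (out : List String) : Decidable (Spec_find_max_digits_in_symmetric_words symmetric out) := by unfold Spec_find_max_digits_in_symmetric_words; infer_instance

-- ===== CLAIM (what is proved, stated in full; the proofs are below) =====
def Claim_equal_find_max_digits_in_symmetric_words : Prop := ∀ (symmetric : List String), Dom_find_max_digits_in_symmetric_words symmetric → Spec_find_max_digits_in_symmetric_words symmetric (find_max_digits_in_symmetric_words symmetric)

-- ===== LEMMAS AND PROOFS =====

-- the running maximum of B, over a prefix
def pvMaxPre (xs : List String) : Int := (xs.map pvCountB).foldl max 0

lemma foldl_count_shift (P : Char → Prop) [DecidablePred P] (l : List Char) (n : Int) :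
    l.foldl (fun n c => if P c then n + 1 else n) n
      = n + l.foldl (fun n c => if P c then n + 1 else n) 0 := by
  induction l generalizing n with
  | nil => simp
  | cons c t ih =>
    simp only [List.foldl_cons]
    by_cases h : P c <;> simp only [h, if_true, if_false]
    · rw [ih (n + 1), ih (0 + 1)]; ring
    · exact ih n

lemma countA_eq_countB (w : String) : pvCountA w = pvCountB w := by
  unfold pvCountA pvCountB
  generalize w.toList = l
  induction l with
  | nil => simp
  | cons c t ih =>
    simp only [List.foldl_cons, List.map_cons, List.sum_cons]
    by_cases h : '0' ≤ c ∧ c ≤ '9'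
    · rw [if_pos h, if_pos h, foldl_count_shift (fun c => '0' ≤ c ∧ c ≤ '9') t (0 + 1), ih]; ring
    · rw [if_neg h, if_neg h]; simpa using ih

lemma countB_nonneg (w : String) : 0 ≤ pvCountB w := by
  unfold pvCountB
  induction w.toList with
  | nil => simp
  | cons c t ih =>
    simp only [List.map_cons, List.sum_cons]
    by_cases h : '0' ≤ c ∧ c ≤ '9' <;> simp [h] <;> omega

lemma maxPre_nonneg (xs : List String) : 0 ≤ pvMaxPre xs := by
  unfold pvMaxPre
  induction xs using List.reverseRecOn with
  | nil => simp
  | append_singleton t w ih =>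
    simp only [List.map_append, List.foldl_append, List.map_cons, List.map_nil,
      List.foldl_cons, List.foldl_nil]
    exact le_trans ih (le_max_left _ _)

lemma maxPre_append (xs : List String) (w : String) :
    pvMaxPre (xs ++ [w]) = max (pvMaxPre xs) (pvCountB w) := by
  simp [pvMaxPre]

lemma mem_le_maxPre (t : List String) (v : String) (hv : v ∈ t) :
    pvCountB v ≤ pvMaxPre t := by
  induction t using List.reverseRecOn with
  | nil => simp at hv
  | append_singleton t' u ih =>
    rw [maxPre_append]
    rcases List.mem_append.mp hv with h' | h'
    · exact le_trans (ih h') (le_max_left _ _)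
    · simp at h'; subst h'; exact le_max_right _ _

-- characterisation of A's loop state after processing xs
lemma stateA (xs : List String) :
    xs.foldl pvStepA (0, []) =
      (pvMaxPre xs,
       if pvMaxPre xs = 0 then []
       else xs.filter (fun w => decide (pvCountB w = pvMaxPre xs))) := by
  induction xs using List.reverseRecOn with
  | nil => simp [pvMaxPre]
  | append_singleton t w ih =>
    rw [List.foldl_append, List.foldl_cons, List.foldl_nil, ih, maxPre_append]
    have hn := countB_nonneg w
    have hm := maxPre_nonneg t
    unfold pvStepA
    rw [countA_eq_countB]
    rcases lt_trichotomy (pvCountB w) (pvMaxPre t) with h | h | h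
    · -- count < running max: state unchanged, max unchanged
      have hmax : max (pvMaxPre t) (pvCountB w) = pvMaxPre t := by omega
      have h1 : ¬ pvCountB w > pvMaxPre t := by omega
      have h2 : ¬ (pvCountB w = pvMaxPre t ∧ pvCountB w > 0) := by omega
      simp only [hmax, h1, if_false, h2]
      by_cases hz : pvMaxPre t = 0
      · omega
      · have hd : decide (pvCountB w = pvMaxPre t) = false := by simp; omega
        simp [hz, List.filter_append, hd]
    · -- count = running max
      have hmax : max (pvMaxPre t) (pvCountB w) = pvMaxPre t := by omega
      have h1 : ¬ pvCountB w > pvMaxPre t := by omega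
      by_cases hz : pvMaxPre t = 0
      · have hw0 : pvCountB w = 0 := by omega
        have h2 : ¬ (pvCountB w = pvMaxPre t ∧ pvCountB w > 0) := by omega
        simp [hz, hw0]
      · have h2 : pvCountB w = pvMaxPre t ∧ pvCountB w > 0 := ⟨h, by omega⟩
        simp [h2, hz, List.filter_append]
        omega
    · -- count > running max: reset
      have hmax : max (pvMaxPre t) (pvCountB w) = pvCountB w := by omega
      have h1 : pvCountB w > pvMaxPre t := h
      simp only [hmax, h1, if_true, gt_iff_lt]
      have hz : ¬ pvCountB w = 0 := by omega
      simp only [hz, if_false]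
      rw [List.filter_append]
      have hfil : t.filter (fun v => decide (pvCountB v = pvCountB w)) = [] := by
        rw [List.filter_eq_nil_iff]
        intro v hv
        simp only [decide_eq_true_eq]
        intro he
        have := mem_le_maxPre t v hv
        omega
      simp [hfil]

-- B's zip-filter-map equals a plain filter on the words
lemma zip_filter_map (xs : List String) (m : Int) :
    ((xs.zip (xs.map pvCountB)).filter (fun p => decide (p.2 = m))).map Prod.fst
      = xs.filter (fun w => decide (pvCountB w = m)) := by
  induction xs with
  | nil => simp
  | cons w t ih =>
    simp only [List.map_cons, List.zip_cons_cons, List.filter_cons]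
    by_cases h : pvCountB w = m <;> simp [h, ih]

theorem pv_main (symmetric : List String) :
    find_max_digits_in_symmetric_words symmetric
      = find_max_digits_in_symmetric_words_alt symmetric := by
  unfold find_max_digits_in_symmetric_words find_max_digits_in_symmetric_words_alt
  by_cases he : symmetric = []
  · simp [he]
  · simp only [he, if_false]
    rw [stateA]
    show _ = if (symmetric.map pvCountB).foldl max 0 = 0 then [] else _
    rw [show (symmetric.map pvCountB).foldl max 0 = pvMaxPre symmetric from rfl]
    by_cases hz : pvMaxPre symmetric = 0
    · simp [hz]
    · simp only [hz, if_false]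
      exact (zip_filter_map symmetric (pvMaxPre symmetric)).symm

-- ===== VERDICT (by name: the statement is the Claim_ definition above) =====
theorem find_max_digits_in_symmetric_words_spec : Claim_equal_find_max_digits_in_symmetric_words := by
  intro symmetric _
  exact pv_main symmetric
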